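-- pv_equiv track=rewrite | github.com/RomVargas/algoritmosJPN | Python/furthest_identical digram.py | furthest_identical_digrams
-- ===== SOURCE A (Python) =====
-- def furthest_identical_digrams(S):
--     """
--     It creates a list of all the digrams in the string, then iterates over all pairs of digrams, and
--     returns the maximum distance between any two identical digrams
--
--     :param S: a string
--     :return: The maximum distance between two identical digrams in the string S.
--     """
--     digrams = [S[i:i+2] for i in range(len(S)-1)]
--     max_distance = -1
--     for i in range(len(digrams)):
--         for j in range(i+1, len(digrams)):
--             if digrams[i] == digrams[j]:
--                 distance = j - i
--                 if distance > max_distance: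
--                     max_distance = distance
--     return max_distance
-- ===== SOURCE B (Python) =====
-- def furthest_identical_digrams(S):
--     """One-pass rewrite: remember the first index of each digram and take the
--     furthest current-index-minus-first-index; O(n) instead of O(n^2)."""
--     first = {}
--     best = -1
--     for j in range(len(S) - 1):
--         d = S[j:j + 2]
--         if d in first:
--             best = max(best, j - first[d])
--         else:
--             first[d] = j
--     return best
-- ===== Notes on version B (the rewrite author's own statement) =====
-- stated objective: faster
-- what changed: Replaced A's quadratic scan over all digram pairs with a single pass that stores the first index of each digram in a dict and maximises current-index minus first-index.
import Mathlib
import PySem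

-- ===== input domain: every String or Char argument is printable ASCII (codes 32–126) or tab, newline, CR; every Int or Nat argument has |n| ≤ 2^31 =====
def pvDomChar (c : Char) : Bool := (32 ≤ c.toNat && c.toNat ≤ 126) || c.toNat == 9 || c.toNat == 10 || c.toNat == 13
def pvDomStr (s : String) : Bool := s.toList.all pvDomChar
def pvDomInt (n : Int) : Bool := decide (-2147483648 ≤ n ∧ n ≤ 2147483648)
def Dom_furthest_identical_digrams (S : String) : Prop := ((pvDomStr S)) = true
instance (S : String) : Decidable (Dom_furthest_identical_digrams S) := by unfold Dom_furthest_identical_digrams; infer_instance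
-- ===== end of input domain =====

-- B replaces A's quadratic all-pairs scan over digrams by a single pass that remembers
-- the first index of each digram in a dict and maximises (current index - first index).

-- ===== PORT A =====
def furthest_identical_digrams (S : String) : Int :=
  let digrams : List String :=
    (PySem.List.pyRange 0 (PySem.Str.len S - 1) 1).map
      (fun i => PySem.Str.slice S (some i) (some (i + 2)))
  (PySem.List.pyRange 0 (digrams.length : Int) 1).foldl
    (fun max_distance i =>
      (PySem.List.pyRange (i + 1) (digrams.length : Int) 1).foldl
        (fun max_distance j =>
          if PySem.List.pyGetD digrams i "" == PySem.List.pyGetD digrams j "" then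
            let distance := j - i
            if distance > max_distance then distance else max_distance
          else max_distance)
        max_distance)
    (-1)

-- ===== PORT B =====
def furthest_identical_digrams_alt (S : String) : Int :=
  ((PySem.List.pyRange 0 (PySem.Str.len S - 1) 1).foldl
    (fun (st : PySem.Dict String Int × Int) j =>
      let d := PySem.Str.slice S (some j) (some (j + 2))
      match st.1.get? d with
      | some f0 => (st.1, max st.2 (j - f0))
      | none => (st.1.insert d j, st.2))
    (PySem.Dict.empty, -1)).2

-- ===== PRECONDITION & SPEC =====
def Spec_furthest_identical_digrams (S : String) (out : Int) : Prop := out = furthest_identical_digrams_alt S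
instance (S : String) (out : Int) : Decidable (Spec_furthest_identical_digrams S out) := by unfold Spec_furthest_identical_digrams; infer_instance

-- ===== CLAIM (what is proved, stated in full; the proofs are below) =====
def Claim_equal_furthest_identical_digrams : Prop := ∀ (S : String), Dom_furthest_identical_digrams S → Spec_furthest_identical_digrams S (furthest_identical_digrams S)

-- ===== LEMMAS AND PROOFS =====

-- the digram starting at index i
def pvDig (S : String) (i : Int) : String := PySem.Str.slice S (some i) (some (i + 2))

-- A's program, rephrased on pvDig with explicit bound N (proved equal to the port below)
def pvAstep (S : String) (N : Int) (md : Int) (i : Int) : Int :=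
  (PySem.List.pyRange (i + 1) N 1).foldl
    (fun md j =>
      if pvDig S i == pvDig S j then
        (if j - i > md then j - i else md)
      else md)
    md

def pvA (S : String) (N : Int) : Int :=
  (PySem.List.pyRange 0 N 1).foldl (pvAstep S N) (-1)

-- B's loop step and state
def pvStep (S : String) (st : PySem.Dict String Int × Int) (j : Int) :
    PySem.Dict String Int × Int :=
  match st.1.get? (pvDig S j) with
  | some f0 => (st.1, max st.2 (j - f0))
  | none => (st.1.insert (pvDig S j) j, st.2)

def pvBst (S : String) (N : Int) : PySem.Dict String Int × Int :=
  (PySem.List.pyRange 0 N 1).foldl (pvStep S) (PySem.Dict.empty, -1)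

-- invariant of B's loop after the indices < m have been processed
def pvInv (S : String) (m : Int) (st : PySem.Dict String Int × Int) : Prop :=
  (∀ s k, st.1.get? s = some k →
      0 ≤ k ∧ k < m ∧ pvDig S k = s ∧ ∀ i, 0 ≤ i → i < k → pvDig S i ≠ s) ∧
  (∀ s, (∃ i, 0 ≤ i ∧ i < m ∧ pvDig S i = s) → ∃ k, st.1.get? s = some k) ∧
  (-1 ≤ st.2) ∧
  (∀ i j, 0 ≤ i → i < j → j < m → pvDig S i = pvDig S j → j - i ≤ st.2) ∧
  (st.2 = -1 ∨ ∃ i j, 0 ≤ i ∧ i < j ∧ j < m ∧ pvDig S i = pvDig S j ∧ st.2 = j - i)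

-- generic fold lemmas (Int accumulator)
theorem pv_foldl_le {β : Type} (l : List β) (st : Int → β → Int)
    (h : ∀ a x, x ∈ l → a ≤ st a x) (a : Int) : a ≤ l.foldl st a := by
  induction l generalizing a with
  | nil => simp
  | cons y t ih =>
    simp only [List.foldl_cons]
    exact le_trans (h a y (by simp)) (ih (fun a x hx => h a x (by simp [hx])) _)

theorem pv_le_foldl {β : Type} (l : List β) (st : Int → β → Int)
    (h : ∀ a x, x ∈ l → a ≤ st a x) (x : β) (hx : x ∈ l) (v : Int)
    (hv : ∀ a, v ≤ st a x) (a : Int) : v ≤ l.foldl st a := by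
  induction l generalizing a with
  | nil => cases hx
  | cons y t ih =>
    simp only [List.foldl_cons]
    rcases List.mem_cons.1 hx with rfl | hxt
    · exact le_trans (hv a) (pv_foldl_le t st (fun a z hz => h a z (by simp [hz])) _)
    · exact ih (fun a z hz => h a z (by simp [hz])) hxt _

theorem pv_foldl_cases {β : Type} (l : List β) (st : Int → β → Int) (Q : Int → Prop)
    (h : ∀ a x, x ∈ l → st a x = a ∨ Q (st a x)) (a : Int) :
    l.foldl st a = a ∨ Q (l.foldl st a) := by
  induction l generalizing a with
  | nil => simp
  | cons y t ih =>
    simp only [List.foldl_cons]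
    rcases ih (fun a x hx => h a x (by simp [hx])) (st a y) with heq | hQ
    · rw [heq]
      exact h a y (by simp)
    · exact Or.inr hQ

-- A-side properties
theorem pvAstep_mono (S : String) (N : Int) : ∀ a i, a ≤ pvAstep S N a i := by
  intro a i
  exact pv_foldl_le _ _ (fun a j _ => by split_ifs <;> omega) a

theorem pvA_ge (S : String) (N : Int) : -1 ≤ pvA S N :=
  pv_foldl_le _ _ (fun a i _ => pvAstep_mono S N a i) _

theorem pvA_bound (S : String) (N : Int) (i j : Int) (hi : 0 ≤ i) (hij : i < j)
    (hj : j < N) (hd : pvDig S i = pvDig S j) : j - i ≤ pvA S N := by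
  apply pv_le_foldl _ _ (fun a i _ => pvAstep_mono S N a i) i
    (PySem.List.mem_pyRange_one.2 ⟨hi, by omega⟩)
  intro a
  apply pv_le_foldl _ _ (fun a j _ => by split_ifs <;> omega) j
    (PySem.List.mem_pyRange_one.2 ⟨by omega, hj⟩)
  intro b
  have hb : (pvDig S i == pvDig S j) = true := beq_iff_eq.2 hd
  rw [hb]
  simp only [if_true]
  split_ifs <;> omega

theorem pvA_cases (S : String) (N : Int) :
    pvA S N = -1 ∨ ∃ i j, 0 ≤ i ∧ i < j ∧ j < N ∧ pvDig S i = pvDig S j ∧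
      pvA S N = j - i := by
  apply pv_foldl_cases _ _
    (fun v => ∃ i j, 0 ≤ i ∧ i < j ∧ j < N ∧ pvDig S i = pvDig S j ∧ v = j - i)
  intro a i hi
  rcases PySem.List.mem_pyRange_one.1 hi with ⟨hi0, hiN⟩
  apply pv_foldl_cases _ _
    (fun v => ∃ i j, 0 ≤ i ∧ i < j ∧ j < N ∧ pvDig S i = pvDig S j ∧ v = j - i)
  intro b j hj
  rcases PySem.List.mem_pyRange_one.1 hj with ⟨hj1, hjN⟩
  split_ifs with hbeq hgt
  · exact Or.inr ⟨i, j, hi0, by omega, hjN, beq_iff_eq.1 hbeq, rfl⟩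
  · exact Or.inl rfl
  · exact Or.inl rfl

-- B-side: the invariant is preserved by one step
theorem pvStep_inv (S : String) (m : Int) (st : PySem.Dict String Int × Int)
    (hm : 0 ≤ m) (h : pvInv S m st) : pvInv S (m + 1) (pvStep S st m) := by
  obtain ⟨h1, h2, h3, h4, h5⟩ := h
  unfold pvStep
  rcases hg : st.1.get? (pvDig S m) with _ | f0
  · -- new digram: insert, best unchanged
    show pvInv S (m + 1) (st.1.insert (pvDig S m) m, st.2)
    refine ⟨?_, ?_, h3, ?_, ?_⟩
    · intro s k hk
      rw [PySem.Dict.get?_insert] at hk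
      split at hk
      · rename_i hsm
        obtain rfl : m = k := by injection hk
        refine ⟨hm, by omega, hsm.symm, ?_⟩
        intro i hi0 him hfi
        rcases h2 s ⟨i, hi0, him, hfi⟩ with ⟨k', hk'⟩
        rw [hsm, hg] at hk'
        cases hk'
      · obtain ⟨hk0, hkm, hks, hmin⟩ := h1 s k hk
        exact ⟨hk0, by omega, hks, hmin⟩
    · intro s hs
      rw [PySem.Dict.get?_insert]
      by_cases hsm : s = pvDig S m
      · exact ⟨m, by rw [if_pos hsm]⟩
      · obtain ⟨i, hi0, him, hfi⟩ := hs
        have him' : i < m := by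
          rcases lt_or_eq_of_le (by omega : i ≤ m) with h' | h'
          · exact h'
          · exact absurd (h' ▸ hfi) (fun he => hsm he.symm)
        rw [if_neg hsm]
        exact h2 s ⟨i, hi0, him', hfi⟩
    · intro i j hi0 hij hjm hd
      rcases lt_or_eq_of_le (by omega : j ≤ m) with h' | rfl
      · exact h4 i j hi0 hij h' hd
      · exfalso
        rcases h2 (pvDig S j) ⟨i, hi0, hij, hd⟩ with ⟨k, hk⟩
        rw [hg] at hk
        cases hk
    · rcases h5 with h' | ⟨i, j, hi0, hij, hjm, hd, he⟩
      · exact Or.inl h'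
      · exact Or.inr ⟨i, j, hi0, hij, by omega, hd, he⟩
  · -- digram seen before: best updated with m - first index
    obtain ⟨hf0, hfm, hfd, hmin⟩ := h1 (pvDig S m) f0 hg
    show pvInv S (m + 1) (st.1, max st.2 (m - f0))
    refine ⟨?_, ?_, le_trans h3 (le_max_left _ _), ?_, ?_⟩
    · intro s k hk
      obtain ⟨hk0, hkm, hks, hm'⟩ := h1 s k hk
      exact ⟨hk0, by omega, hks, hm'⟩
    · intro s hs
      by_cases hsm : s = pvDig S m
      · exact ⟨f0, by rw [hsm]; exact hg⟩
      · obtain ⟨i, hi0, him, hfi⟩ := hs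
        have him' : i < m := by
          rcases lt_or_eq_of_le (by omega : i ≤ m) with h' | h'
          · exact h'
          · exact absurd (h' ▸ hfi) (fun he => hsm he.symm)
        exact h2 s ⟨i, hi0, him', hfi⟩
    · intro i j hi0 hij hjm hd
      rcases lt_or_eq_of_le (by omega : j ≤ m) with h' | rfl
      · exact le_trans (h4 i j hi0 hij h' hd) (le_max_left _ _)
      · have hfle : f0 ≤ i := by
          by_contra hlt
          exact hmin i hi0 (by omega) hd
        exact le_trans (by omega : j - i ≤ j - f0) (le_max_right _ _)
    · rcases max_choice st.2 (m - f0) with hmx | hmx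
      · rw [hmx]
        rcases h5 with h' | ⟨i, j, hi0, hij, hjm, hd, he⟩
        · exact Or.inl h'
        · exact Or.inr ⟨i, j, hi0, hij, by omega, hd, he⟩
      · rw [hmx]
        exact Or.inr ⟨f0, m, hf0, hfm, by omega, hfd, rfl⟩

theorem pvBst_inv (S : String) (m : Nat) : pvInv S (m : Int) (pvBst S (m : Int)) := by
  induction m with
  | zero =>
    refine ⟨?_, ?_, by exact le_refl _, ?_, Or.inl rfl⟩
    · intro s k hk
      simp [pvBst, PySem.List.pyRange_one_eq_nil (by omega : (0:Int) ≤ 0),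
        PySem.Dict.get?_empty] at hk
    · intro s ⟨i, hi0, him, _⟩
      omega
    · intro i j hi0 hij hjm
      omega
  | succ n ih =>
    have hsplit : PySem.List.pyRange 0 ((n : Int) + 1) 1 =
        PySem.List.pyRange 0 (n : Int) 1 ++ [(n : Int)] :=
      PySem.List.pyRange_one_succ_right (by omega)
    have : pvBst S ((n : Int) + 1) = pvStep S (pvBst S (n : Int)) (n : Int) := by
      unfold pvBst
      rw [hsplit, List.foldl_append, List.foldl_cons, List.foldl_nil]
    push_cast
    rw [this]
    exact pvStep_inv S (n : Int) _ (by omega) ih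

-- main equality on the rephrased programs
theorem pv_main (S : String) (N : Int) (hN : 0 ≤ N) :
    pvA S N = (pvBst S N).2 := by
  have hinv := pvBst_inv S N.toNat
  rw [Int.toNat_of_nonneg hN] at hinv
  obtain ⟨_, _, hB3, hB4, hB5⟩ := hinv
  apply le_antisymm
  · rcases pvA_cases S N with heq | ⟨i, j, hi0, hij, hjN, hd, heq⟩
    · rw [heq]; exact hB3
    · rw [heq]; exact hB4 i j hi0 hij hjN hd
  · rcases hB5 with heq | ⟨i, j, hi0, hij, hjN, hd, heq⟩
    · rw [heq]; exact pvA_ge S N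
    · rw [heq]; exact pvA_bound S N i j hi0 hij hjN hd

-- a pyRange from 0 with a possibly negative bound equals the one with the bound clamped to 0
theorem pvRange_toNat (N : Int) :
    PySem.List.pyRange 0 N 1 = PySem.List.pyRange 0 ((N.toNat : Int)) 1 := by
  rw [PySem.List.pyRange_one, PySem.List.pyRange_one]
  have h : (N - 0).toNat = (((N.toNat : Int)) - 0).toNat := by omega
  rw [h]

-- the A port equals pvA at the clamped bound
theorem portA_eq (S : String) :
    furthest_identical_digrams S = pvA S (((PySem.Str.len S - 1).toNat : Int)) := by
  unfold furthest_identical_digrams pvA pvAstep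
  have hlen : ((((PySem.List.pyRange 0 (PySem.Str.len S - 1) 1).map
      (fun i => PySem.Str.slice S (some i) (some (i + 2)))).length : Nat) : Int)
      = ((PySem.Str.len S - 1).toNat : Int) := by
    rw [List.length_map, PySem.List.length_pyRange_one]
    omega
  simp only [hlen]
  apply PySem.List.foldl_congr_mem
  intro acc i hi
  rcases PySem.List.mem_pyRange_one.1 hi with ⟨hi0, hiN⟩
  apply PySem.List.foldl_congr_mem
  intro acc' j hj
  rcases PySem.List.mem_pyRange_one.1 hj with ⟨hj1, hjN⟩
  rw [PySem.List.pyGetD_map_pyRange_of_nonneg _ _ _ _ hi0 (by omega),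
    PySem.List.pyGetD_map_pyRange_of_nonneg _ _ _ _ (by omega) (by omega)]
  rfl

-- the B port equals (pvBst …).2 at the same clamped bound
theorem portB_eq (S : String) :
    furthest_identical_digrams_alt S = (pvBst S (((PySem.Str.len S - 1).toNat : Int))).2 := by
  unfold furthest_identical_digrams_alt pvBst pvStep pvDig
  rw [pvRange_toNat]

-- ===== VERDICT (by name: the statement is the Claim_ definition above) =====
theorem furthest_identical_digrams_spec : Claim_equal_furthest_identical_digrams := by
  intro S _
  unfold Spec_furthest_identical_digrams
  rw [portA_eq S, portB_eq S]
  exact pv_main S _ (by omega)
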